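-- pv_equiv track=rewrite | github.com/DIB-PP/sparta | Python CODE KATA/240514/나머지가 1이 되는 수 찾기.py | solution
-- ===== SOURCE A (Python) =====
-- def solution(n):
--     a = []
--     c = []
--     for i in range(1, int(n+1)):
--         a.append(i)
--
--     for b in a:
--         if n % b == 1:
--             c.append(b)
--     return min(c)
-- ===== SOURCE B (Python) =====
-- def solution(n):
--     m = n - 1
--     i = 2
--     while i * i <= m:
--         if m % i == 0:
--             return i
--         i += 1
--     return m
-- ===== Notes on version B (the rewrite author's own statement) =====
-- stated objective: faster
-- what changed: Instead of scanning every b in 1..n for n % b == 1 and taking the min, B returns the smallest divisor >= 2 of n-1 found by trial division up to sqrt(n-1) (returning n-1 itself when it is prime).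
import Mathlib
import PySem

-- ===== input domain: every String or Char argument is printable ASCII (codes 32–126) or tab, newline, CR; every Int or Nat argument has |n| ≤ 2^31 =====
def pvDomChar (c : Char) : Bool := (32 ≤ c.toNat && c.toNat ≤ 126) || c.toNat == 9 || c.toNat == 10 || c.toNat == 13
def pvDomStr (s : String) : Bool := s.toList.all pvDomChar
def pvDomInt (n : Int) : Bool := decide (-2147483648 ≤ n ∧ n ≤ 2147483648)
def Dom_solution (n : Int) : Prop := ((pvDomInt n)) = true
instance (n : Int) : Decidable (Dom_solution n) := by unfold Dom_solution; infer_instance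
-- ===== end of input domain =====

-- B replaces A's O(n) scan of all b in 1..n by trial division for the smallest
-- divisor ≥ 2 of n-1, stopping at √(n-1): O(√n), an asymptotic speed-up.

-- ===== PORT A =====
-- each '.append' loop is folded with cons and reversed at the end (Python's O(1) append)
def solution (n : Int) : Int :=
  let a := ((PySem.List.pyRange 1 (n+1) 1).foldl (fun acc i => i :: acc) []).reverse
  let c := (a.foldl (fun acc b => if PySem.Int.mod n b == 1 then b :: acc else acc) []).reverse
  (PySem.List.min? c (fun x => x)).getD 0   -- min(c); none (empty c) excluded by Pre_

-- ===== PORT B =====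
-- termination measure decrease for the while-loop (kept as a lemma the definition cites)
lemma tdivLoop_dec (m i : Int) (h : i * i ≤ m) (h2 : ¬ PySem.Int.mod m i = 0) :
    (m - (i + 1)).toNat < (m - i).toNat := by
  have hsq := mul_self_nonneg i
  have hi : i < m := by
    rcases lt_trichotomy i 0 with h0 | h0 | h0
    · omega
    · subst h0
      simp [PySem.Int.mod] at h2
      omega
    · rcases (by omega : i = 1 ∨ 2 ≤ i) with h1 | h1
      · subst h1; simp [PySem.Int.mod] at h2
      · have h2i : 2 * i ≤ i * i := mul_le_mul_of_nonneg_right h1 (by omega)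
        omega
  omega

-- the 'while i*i <= m' loop of Source B
def tdivLoop (m i : Int) : Int :=
  if h : i * i ≤ m then
    if h2 : PySem.Int.mod m i = 0 then i else tdivLoop m (i + 1)
  else m
termination_by (m - i).toNat
decreasing_by
  exact tdivLoop_dec m i h h2

def solution_alt (n : Int) : Int :=
  tdivLoop (n - 1) 2

-- ===== PRECONDITION & SPEC =====
-- For n ≤ 2 the filtered list c is empty and A raises ValueError on min(c).
def Pre_solution (n : Int) : Prop := 3 ≤ n
instance (n : Int) : Decidable (Pre_solution n) := by unfold Pre_solution; infer_instance
def pvWitness_solution : Int := (7)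

def Spec_solution (n : Int) (out : Int) : Prop := out = solution_alt n
instance (n : Int) (out : Int) : Decidable (Spec_solution n out) := by unfold Spec_solution; infer_instance

-- ===== CLAIM (what is proved, stated in full; the proofs are below) =====
def Claim_equal_solution : Prop := ∀ (n : Int), Dom_solution n → Pre_solution n → Spec_solution n (solution n)

-- ===== LEMMAS AND PROOFS =====

-- for 2 ≤ b, "n % b == 1" is "b divides n - 1"
lemma mod_eq_one_iff_dvd (n b : Int) (hb : 2 ≤ b) :
    PySem.Int.mod n b = 1 ↔ b ∣ (n - 1) := by
  rw [PySem.Int.mod_eq_emod_of_pos (a := n) (by omega)]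
  constructor
  · intro h
    have : (n - 1) % b = 0 := by
      rw [Int.sub_emod, h]
      simp [Int.emod_eq_of_lt (by norm_num : (0:Int) ≤ 1) (by omega : (1:Int) < b)]
    exact Int.dvd_of_emod_eq_zero this
  · intro h
    obtain ⟨k, hk⟩ := h
    have hn : n = 1 + b * k := by omega
    rw [hn, Int.add_mul_emod_self_left]
    exact Int.emod_eq_of_lt (by norm_num) (by omega)

lemma foldl_cons_rev (xs : List Int) (acc : List Int) :
    xs.foldl (fun acc i => i :: acc) acc = xs.reverse ++ acc := by
  induction xs generalizing acc with
  | nil => simp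
  | cons x t ih => simp [List.foldl_cons, ih]

lemma foldl_filter_rev (p : Int → Bool) (xs : List Int) (acc : List Int) :
    xs.foldl (fun acc b => if p b then b :: acc else acc) acc = (xs.filter p).reverse ++ acc := by
  induction xs generalizing acc with
  | nil => simp
  | cons x t ih =>
    simp only [List.foldl_cons, List.filter_cons]
    by_cases h : p x <;> simp [h, ih]

-- the loop of B returns a divisor ≥ 2 of m that is minimal, provided no divisor < i exists
lemma tdivLoop_spec (m i : Int) (hm : 2 ≤ m) (hi : 2 ≤ i)
    (hno : ∀ d, 2 ≤ d → d < i → ¬ d ∣ m) :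
    2 ≤ tdivLoop m i ∧ tdivLoop m i ∣ m ∧
      ∀ d, 2 ≤ d → d ∣ m → tdivLoop m i ≤ d := by
  induction i using tdivLoop.induct (m := m) with
  | case1 i h h2 =>
    -- i*i ≤ m, m % i = 0 : return i
    rw [tdivLoop, dif_pos h, dif_pos h2]
    have hdvd : i ∣ m := by
      rw [PySem.Int.mod_eq_emod_of_pos (a := m) (by omega)] at h2
      exact Int.dvd_of_emod_eq_zero h2
    refine ⟨hi, hdvd, ?_⟩
    intro d hd2 hddvd
    by_contra hlt
    exact hno d hd2 (by omega) hddvd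
  | case2 i h h2 ih =>
    -- i*i ≤ m, m % i ≠ 0 : recurse
    rw [tdivLoop, dif_pos h, dif_neg h2]
    apply ih (by omega)
    intro d hd2 hdlt hddvd
    rcases (by omega : d < i ∨ d = i) with hc | hc
    · exact hno d hd2 hc hddvd
    · subst hc
      apply h2
      rw [PySem.Int.mod_eq_emod_of_pos (a := m) (by omega)]
      exact Int.emod_eq_zero_of_dvd hddvd
  | case3 i h =>
    -- i*i > m : return m (m has no divisor in [2, √m], hence none < m)
    rw [tdivLoop, dif_neg h]
    refine ⟨hm, dvd_refl m, ?_⟩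
    intro d hd2 hddvd
    by_contra hlt
    rw [not_le] at hlt
    obtain ⟨e, he⟩ := hddvd
    have he2 : 2 ≤ e := by
      rcases (by omega : e ≤ 0 ∨ e = 1 ∨ 2 ≤ e) with hx | hx | hx
      · have : d * e ≤ 0 := mul_nonpos_of_nonneg_of_nonpos (by omega) hx
        omega
      · subst hx; omega
      · exact hx
    have hdi : i ≤ d := by
      rcases lt_or_ge d i with hx | hx
      · exact absurd ⟨e, he⟩ (hno d hd2 hx)
      · exact hx
    have hei : i ≤ e := by
      rcases lt_or_ge e i with hx | hx
      · exact absurd ⟨d, by rw [mul_comm]; exact he⟩ (hno e he2 hx)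
      · exact hx
    have hii : i * i ≤ d * e := mul_le_mul hdi hei (by omega) (by omega)
    omega

-- n % 1 is 0, never 1
lemma mod_one_eq_zero (n : Int) : PySem.Int.mod n 1 = 0 := by
  rw [PySem.Int.mod_eq_emod_of_pos (a := n) (by norm_num)]
  exact Int.emod_one n

lemma solution_eq (n : Int) (hn : 3 ≤ n) :
    solution n = solution_alt n := by
  have hm : 2 ≤ n - 1 := by omega
  obtain ⟨h2, hdvd, hmin⟩ :=
    tdivLoop_spec (n - 1) 2 hm le_rfl (by intro d hd2 hdlt; omega)
  show (PySem.List.min?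
      (((((PySem.List.pyRange 1 (n + 1) 1).foldl (fun acc i => i :: acc) []).reverse).foldl
        (fun acc b => if PySem.Int.mod n b == 1 then b :: acc else acc) []).reverse)
      (fun x => x)).getD 0 = tdivLoop (n - 1) 2
  rw [foldl_cons_rev, List.append_nil, List.reverse_reverse,
      foldl_filter_rev, List.append_nil, List.reverse_reverse]
  set p : Int → Bool := fun b => PySem.Int.mod n b == 1 with hp
  set c : List Int := (PySem.List.pyRange 1 (n + 1) 1).filter p with hc
  have hmemc : ∀ b : Int, b ∈ c ↔ 2 ≤ b ∧ b ∣ (n - 1) := by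
    intro b
    rw [hc, List.mem_filter, PySem.List.mem_pyRange_one, hp, beq_iff_eq]
    constructor
    · rintro ⟨⟨h1, _⟩, hmod⟩
      have hb2 : 2 ≤ b := by
        rcases (by omega : b = 1 ∨ 2 ≤ b) with h | h
        · subst h; rw [mod_one_eq_zero] at hmod; omega
        · exact h
      exact ⟨hb2, (mod_eq_one_iff_dvd n b hb2).mp hmod⟩
    · rintro ⟨hb2, hbdvd⟩
      have hble : b ≤ n - 1 := Int.le_of_dvd (by omega) hbdvd
      exact ⟨⟨by omega, by omega⟩, (mod_eq_one_iff_dvd n b hb2).mpr hbdvd⟩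
  have hne : (n - 1) ∈ c := (hmemc (n - 1)).mpr ⟨hm, dvd_refl _⟩
  cases h : PySem.List.min? c (fun x => x) with
  | none =>
    rw [PySem.List.min?_eq_none_iff] at h
    rw [h] at hne
    exact absurd hne (List.not_mem_nil)
  | some r0 =>
    simp only [Option.getD_some]
    obtain ⟨hr02, hr0dvd⟩ := (hmemc r0).mp (PySem.List.min?_mem h)
    have hle1 : tdivLoop (n - 1) 2 ≤ r0 := hmin r0 hr02 hr0dvd
    have hrc : tdivLoop (n - 1) 2 ∈ c := (hmemc _).mpr ⟨h2, hdvd⟩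
    have hle2 : r0 ≤ tdivLoop (n - 1) 2 := PySem.List.min?_isMin h _ hrc
    omega

-- ===== VERDICT (by name: the statement is the Claim_ definition above) =====
theorem solution_spec : Claim_equal_solution := by
  intro n _ hpre
  exact solution_eq n hpre
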